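-- pv_equiv track=rewrite | github.com/MikeWebDeveloper/openfootmanager | ofm/core/football/detailed_positions.py | can_play_position
-- ===== SOURCE A (Python) =====
-- from enum import IntEnum, auto
-- from typing import Dict, List
--
-- class DetailedPosition(IntEnum):
--     """Detailed player positions for tactical and transfer systems."""
--
--     # Goalkeeper
--     GK = auto()
--
--     # Defenders
--     CB = auto()  # Center Back
--     LB = auto()  # Left Back
--     RB = auto()  # Right Back
--     LWB = auto()  # Left Wing Back
--     RWB = auto()  # Right Wing Back
--
--     # Midfielders
--     CDM = auto()  # Central Defensive Midfielder
--     CM = auto()  # Central Midfielder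
--     CAM = auto()  # Central Attacking Midfielder
--     LM = auto()  # Left Midfielder
--     RM = auto()  # Right Midfielder
--
--     # Forwards/Wingers
--     LW = auto()  # Left Winger
--     RW = auto()  # Right Winger
--     CF = auto()  # Center Forward
--     ST = auto()  # Striker
--
-- POSITION_FAMILIES: Dict[str, List[DetailedPosition]] = {
--     "central_defenders": [DetailedPosition.CB],
--     "fullbacks": [DetailedPosition.LB, DetailedPosition.RB],
--     "wingbacks": [DetailedPosition.LWB, DetailedPosition.RWB],
--     "defensive_midfielders": [DetailedPosition.CDM],
--     "central_midfielders": [DetailedPosition.CM, DetailedPosition.CAM],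
--     "wide_midfielders": [DetailedPosition.LM, DetailedPosition.RM],
--     "wingers": [DetailedPosition.LW, DetailedPosition.RW],
--     "forwards": [DetailedPosition.CF, DetailedPosition.ST],
-- }
--
-- def get_similar_positions(position: DetailedPosition) -> List[DetailedPosition]:
--     """Get positions similar to the given position."""
--     similar = []
--
--     for family, positions in POSITION_FAMILIES.items():
--         if position in positions:
--             similar.extend(positions)
--
--     # Remove the original position
--     similar = [p for p in similar if p != position]
--
--     return similar
--
-- def can_play_position(
--     player_positions: Dict[DetailedPosition, int],
--     target_position: DetailedPosition,
--     min_rating: int = 10,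
-- ) -> bool:
--     """
--     Check if a player can play a specific position.
--
--     Args:
--         player_positions: Dict of player's position ratings
--         target_position: The position to check
--         min_rating: Minimum rating required (default 10)
--
--     Returns:
--         True if player can play the position
--     """
--     # Direct position check
--     if player_positions.get(target_position, 0) >= min_rating:
--         return True
--
--     # Check similar positions with penalty
--     similar = get_similar_positions(target_position)
--     for pos in similar:
--         if player_positions.get(pos, 0) >= min_rating + 5:
--             return True
--
--     return False
-- ===== SOURCE B (Python) =====
-- # Every POSITION_FAMILIES family has at most two members, so the "similar positions"
-- # of any position form at most ONE mate: precompute a symmetric mate map and answer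
-- # with two constant-time lookups -- no scan over the family table, no helper loop.
-- _MATE = {
--     3: 4, 4: 3,      # fullbacks LB<->RB
--     5: 6, 6: 5,      # wingbacks LWB<->RWB
--     8: 9, 9: 8,      # central midfielders CM<->CAM
--     10: 11, 11: 10,  # wide midfielders LM<->RM
--     12: 13, 13: 12,  # wingers LW<->RW
--     14: 15, 15: 14,  # forwards CF<->ST
-- }
--
-- def can_play_position(player_positions, target_position, min_rating=10):
--     if player_positions.get(target_position, 0) >= min_rating:
--         return True
--     mate = _MATE.get(target_position)
--     return mate is not None and player_positions.get(mate, 0) >= min_rating + 5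
-- ===== Notes on version B (the rewrite author's own statement) =====
-- stated objective: simpler
-- what changed: B replaces the family-table scan plus similar-positions helper by the observation that every family has at most two members, so each position has at most one mate: a precomputed symmetric mate map and two O(1) dict lookups give the answer with no loop at all.
import Mathlib
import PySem

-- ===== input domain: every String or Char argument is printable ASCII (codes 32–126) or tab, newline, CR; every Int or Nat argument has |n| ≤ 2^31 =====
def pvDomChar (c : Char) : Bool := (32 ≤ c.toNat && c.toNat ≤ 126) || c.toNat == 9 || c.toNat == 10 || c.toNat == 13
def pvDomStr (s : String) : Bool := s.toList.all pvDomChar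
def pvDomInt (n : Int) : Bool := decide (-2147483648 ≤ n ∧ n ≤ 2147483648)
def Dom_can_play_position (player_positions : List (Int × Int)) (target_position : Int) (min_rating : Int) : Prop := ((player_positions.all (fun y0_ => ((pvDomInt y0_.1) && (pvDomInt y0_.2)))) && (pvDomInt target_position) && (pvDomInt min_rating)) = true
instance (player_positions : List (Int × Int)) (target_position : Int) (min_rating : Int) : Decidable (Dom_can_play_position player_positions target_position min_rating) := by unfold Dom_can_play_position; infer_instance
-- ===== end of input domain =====

-- B drops the family-table scan: every family has ≤ 2 members, so a precomputed symmetric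
-- mate map and two O(1) lookups replace A's helper loop (objective: simpler).

-- ===== PORT A =====
-- POSITION_FAMILIES values in order (DetailedPosition as its IntEnum value 1..15)
def pvFamilies : List (List Int) :=
  [[2], [3, 4], [5, 6], [7], [8, 9], [10, 11], [12, 13], [14, 15]]

def get_similar_positions (position : Int) : List Int :=
  -- for family, positions in POSITION_FAMILIES.items(): if position in positions: similar.extend(positions)
  let similar := pvFamilies.foldl (fun similar positions => if position ∈ positions then similar ++ positions else similar) []
  -- similar = [p for p in similar if p != position]
  similar.filter (fun p => p ≠ position)

def can_play_position (player_positions : List (Int × Int)) (target_position : Int) (min_rating : Int) : Bool :=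
  if (PySem.Dict.mk player_positions).getD target_position 0 ≥ min_rating then true
  else
    -- for pos in similar: if player_positions.get(pos, 0) >= min_rating + 5: return True
    (get_similar_positions target_position).any
      (fun pos => (PySem.Dict.mk player_positions).getD pos 0 ≥ min_rating + 5)

-- ===== PORT B =====
-- _MATE: each position's unique family mate (families have at most two members)
def pvMate : List (Int × Int) :=
  [(3, 4), (4, 3), (5, 6), (6, 5), (8, 9), (9, 8), (10, 11), (11, 10), (12, 13), (13, 12), (14, 15), (15, 14)]

def can_play_position_alt (player_positions : List (Int × Int)) (target_position : Int) (min_rating : Int) : Bool :=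
  if (PySem.Dict.mk player_positions).getD target_position 0 ≥ min_rating then true
  else
    -- mate = _MATE.get(target_position); mate is not None and get(mate, 0) >= min_rating + 5
    match (PySem.Dict.mk pvMate).get? target_position with
    | some mate => (PySem.Dict.mk player_positions).getD mate 0 ≥ min_rating + 5
    | none => false

-- ===== PRECONDITION & SPEC =====
def Spec_can_play_position (player_positions : List (Int × Int)) (target_position : Int) (min_rating : Int) (out : Bool) : Prop := out = can_play_position_alt player_positions target_position min_rating
instance (player_positions : List (Int × Int)) (target_position : Int) (min_rating : Int) (out : Bool) : Decidable (Spec_can_play_position player_positions target_position min_rating out) := by unfold Spec_can_play_position; infer_instance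

-- ===== CLAIM =====
def Claim_equal_can_play_position : Prop := ∀ (player_positions : List (Int × Int)) (target_position : Int) (min_rating : Int), Dom_can_play_position player_positions target_position min_rating → Spec_can_play_position player_positions target_position min_rating (can_play_position player_positions target_position min_rating)

-- ===== LEMMAS AND PROOFS =====

-- ===== VERDICT =====
theorem can_play_position_spec : Claim_equal_can_play_position := by
  intro pp t m _
  unfold Spec_can_play_position
  by_cases h2 : t = 2
  · subst h2; simp [can_play_position, can_play_position_alt, get_similar_positions, pvFamilies, pvMate, PySem.Dict.get?]
  by_cases h3 : t = 3
  · subst h3; simp [can_play_position, can_play_position_alt, get_similar_positions, pvFamilies, pvMate, PySem.Dict.get?]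
  by_cases h4 : t = 4
  · subst h4; simp [can_play_position, can_play_position_alt, get_similar_positions, pvFamilies, pvMate, PySem.Dict.get?]
  by_cases h5 : t = 5
  · subst h5; simp [can_play_position, can_play_position_alt, get_similar_positions, pvFamilies, pvMate, PySem.Dict.get?]
  by_cases h6 : t = 6
  · subst h6; simp [can_play_position, can_play_position_alt, get_similar_positions, pvFamilies, pvMate, PySem.Dict.get?]
  by_cases h7 : t = 7
  · subst h7; simp [can_play_position, can_play_position_alt, get_similar_positions, pvFamilies, pvMate, PySem.Dict.get?]
  by_cases h8 : t = 8
  · subst h8; simp [can_play_position, can_play_position_alt, get_similar_positions, pvFamilies, pvMate, PySem.Dict.get?]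
  by_cases h9 : t = 9
  · subst h9; simp [can_play_position, can_play_position_alt, get_similar_positions, pvFamilies, pvMate, PySem.Dict.get?]
  by_cases h10 : t = 10
  · subst h10; simp [can_play_position, can_play_position_alt, get_similar_positions, pvFamilies, pvMate, PySem.Dict.get?]
  by_cases h11 : t = 11
  · subst h11; simp [can_play_position, can_play_position_alt, get_similar_positions, pvFamilies, pvMate, PySem.Dict.get?]
  by_cases h12 : t = 12
  · subst h12; simp [can_play_position, can_play_position_alt, get_similar_positions, pvFamilies, pvMate, PySem.Dict.get?]
  by_cases h13 : t = 13
  · subst h13; simp [can_play_position, can_play_position_alt, get_similar_positions, pvFamilies, pvMate, PySem.Dict.get?]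
  by_cases h14 : t = 14
  · subst h14; simp [can_play_position, can_play_position_alt, get_similar_positions, pvFamilies, pvMate, PySem.Dict.get?]
  by_cases h15 : t = 15
  · subst h15; simp [can_play_position, can_play_position_alt, get_similar_positions, pvFamilies, pvMate, PySem.Dict.get?]
  have b3 : ((3 : Int) == t) = false := by simpa using Ne.symm h3
  have b4 : ((4 : Int) == t) = false := by simpa using Ne.symm h4
  have b5 : ((5 : Int) == t) = false := by simpa using Ne.symm h5
  have b6 : ((6 : Int) == t) = false := by simpa using Ne.symm h6
  have b8 : ((8 : Int) == t) = false := by simpa using Ne.symm h8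
  have b9 : ((9 : Int) == t) = false := by simpa using Ne.symm h9
  have b10 : ((10 : Int) == t) = false := by simpa using Ne.symm h10
  have b11 : ((11 : Int) == t) = false := by simpa using Ne.symm h11
  have b12 : ((12 : Int) == t) = false := by simpa using Ne.symm h12
  have b13 : ((13 : Int) == t) = false := by simpa using Ne.symm h13
  have b14 : ((14 : Int) == t) = false := by simpa using Ne.symm h14
  have b15 : ((15 : Int) == t) = false := by simpa using Ne.symm h15
  simp [can_play_position, can_play_position_alt, get_similar_positions, pvFamilies, pvMate, PySem.Dict.get?, List.find?, h2, h3, h4, h5, h6, h7, h8, h9, h10, h11, h12, h13, h14, h15, b3, b4, b5, b6, b8, b9, b10, b11, b12, b13, b14, b15]
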